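-- pv_equiv track=rewrite | github.com/promisemade/miracle | scripts/build_static_site.py | apply_common_route_replacements
-- ===== SOURCE A (Python) =====
-- def apply_common_route_replacements(text: str) -> str:
--     replacements = [
--         ('href="/"', 'href="./index.html#fiches"'),
--         ('href="/ministeres"', 'href="./ministeres.html"'),
--         ('href="/training"', 'href="./index.html#training"'),
--         ('href="/stats"', 'href="./index.html#stats"'),
--         ('href="/quiz"', 'href="./quiz.html"'),
--         ('href="/welcome"', 'href="./index.html#fiches"'),
--         (
--             'href="/feedback?from={{ request.path }}"',
--             'href="https://github.com/promisemade/miracle/issues" target="_blank" rel="noreferrer"',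
--         ),
--     ]
--     for old, new in replacements:
--         text = text.replace(old, new)
--     return text
-- ===== SOURCE B (Python) =====
-- PATTERNS = [
--     'href="/"',
--     'href="/ministeres"',
--     'href="/training"',
--     'href="/stats"',
--     'href="/quiz"',
--     'href="/welcome"',
--     'href="/feedback?from={{ request.path }}"',
-- ]
--
-- REPLACEMENTS = [
--     'href="./index.html#fiches"',
--     'href="./ministeres.html"',
--     'href="./index.html#training"',
--     'href="./index.html#stats"',
--     'href="./quiz.html"',
--     'href="./index.html#fiches"',
--     'href="https://github.com/promisemade/miracle/issues" target="_blank" rel="noreferrer"',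
-- ]
--
--
-- def apply_common_route_replacements(text: str) -> str:
--     routes = list(zip(PATTERNS, REPLACEMENTS))
--     out = []
--     i = 0
--     n = len(text)
--     while i < n:
--         for old, new in routes:
--             if text.startswith(old, i):
--                 out.append(new)
--                 i += len(old)
--                 break
--         else:
--             out.append(text[i])
--             i += 1
--     return "".join(out)
-- ===== Notes on version B (the rewrite author's own statement) =====
-- stated objective: alternative
-- what changed: Replaced seven sequential full-text str.replace passes by a single left-to-right scan that at each position tries each route pattern with startswith and emits its replacement (or the character) once; correctness rests on the patterns being mutually non-overlapping and never reappearing in any replacement output.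
import Mathlib
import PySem

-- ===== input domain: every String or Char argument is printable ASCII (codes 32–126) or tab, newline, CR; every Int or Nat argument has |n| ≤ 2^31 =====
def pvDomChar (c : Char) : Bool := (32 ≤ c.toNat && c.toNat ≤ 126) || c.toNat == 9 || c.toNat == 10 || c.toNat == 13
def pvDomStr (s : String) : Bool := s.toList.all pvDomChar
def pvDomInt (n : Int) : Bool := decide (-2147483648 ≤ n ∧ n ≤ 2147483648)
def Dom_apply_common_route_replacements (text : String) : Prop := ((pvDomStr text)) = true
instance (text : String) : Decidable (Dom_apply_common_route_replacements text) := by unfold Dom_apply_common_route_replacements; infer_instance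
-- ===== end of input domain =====

-- B replaces A's seven sequential str.replace passes by one left-to-right scan that tries
-- each pattern at the current position; same return value (alternative decomposition).

-- ===== PORT A =====
-- the replacement pair list A carries as a literal
def routeTable : List (String × String) := [
  ("href=\"/\"", "href=\"./index.html#fiches\""),
  ("href=\"/ministeres\"", "href=\"./ministeres.html\""),
  ("href=\"/training\"", "href=\"./index.html#training\""),
  ("href=\"/stats\"", "href=\"./index.html#stats\""),
  ("href=\"/quiz\"", "href=\"./quiz.html\""),
  ("href=\"/welcome\"", "href=\"./index.html#fiches\""),
  ("href=\"/feedback?from={{ request.path }}\"",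
   "href=\"https://github.com/promisemade/miracle/issues\" target=\"_blank\" rel=\"noreferrer\"")]

-- for old, new in replacements: text = text.replace(old, new)
def apply_common_route_replacements (text : String) : String :=
  routeTable.foldl (fun t p => PySem.Str.replace t p.1 p.2) text

-- ===== PORT B =====
-- Source B's PATTERNS and REPLACEMENTS, zipped into the scan's route list (as char lists,
-- since the scan works position by position over the characters)
def altPats : List String :=
  ["href=\"/\"",
   "href=\"/ministeres\"",
   "href=\"/training\"",
   "href=\"/stats\"",
   "href=\"/quiz\"",
   "href=\"/welcome\"",
   "href=\"/feedback?from={{ request.path }}\""]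

def altReps : List String :=
  ["href=\"./index.html#fiches\"",
   "href=\"./ministeres.html\"",
   "href=\"./index.html#training\"",
   "href=\"./index.html#stats\"",
   "href=\"./quiz.html\"",
   "href=\"./index.html#fiches\"",
   "href=\"https://github.com/promisemade/miracle/issues\" target=\"_blank\" rel=\"noreferrer\""]

def altRoutes : List (List Char × List Char) :=
  (altPats.zip altReps).map (fun q => (q.1.toList, q.2.toList))

-- one-pass scan: at each position the first pattern that matches (the for/break loop =
-- List.find?) is emitted as its replacement; otherwise the character is copied
def bGo : List Char → List Char
  | [] => []
  | c :: t =>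
    match hf : altRoutes.find? (fun p => PySem.Chars.startswith (c :: t) p.1) with
    | some p => p.2 ++ bGo ((c :: t).drop p.1.length)
    | none => c :: bGo t
termination_by s => s.length
decreasing_by
  · have hm := List.mem_of_find?_eq_some hf
    have h1 : 1 ≤ p.1.length := by
      have h7 : ∀ q ∈ altRoutes, 1 ≤ q.1.length := by decide
      exact h7 p hm
    simp [List.length_drop]; omega
  · simp

def apply_common_route_replacements_alt (text : String) : String :=
  String.ofList (bGo text.toList)

-- ===== PRECONDITION & SPEC =====
def Spec_apply_common_route_replacements (text : String) (out : String) : Prop := out = apply_common_route_replacements_alt text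
instance (text : String) (out : String) : Decidable (Spec_apply_common_route_replacements text out) := by unfold Spec_apply_common_route_replacements; infer_instance

-- ===== CLAIM (what is proved, stated in full; the proofs are below) =====
def Claim_equal_apply_common_route_replacements : Prop := ∀ (text : String), Dom_apply_common_route_replacements text → Spec_apply_common_route_replacements text (apply_common_route_replacements text)

-- ===== LEMMAS AND PROOFS =====

-- structural model of str.replace (old nonempty): scan, on a match emit `new` and jump
def rep (old new : List Char) : List Char → List Char
  | [] => []
  | c :: t =>
    if h : old ≠ [] ∧ old.isPrefixOf (c :: t)
    then new ++ rep old new ((c :: t).drop old.length)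
    else c :: rep old new t
termination_by s => s.length
decreasing_by
  · have h1 : 1 ≤ old.length := by
      cases old with
      | nil => exact absurd rfl h.1
      | cons a l => simp
    simp [List.length_drop]; omega
  · simp

theorem go_spec (old new : List Char) (hne : old ≠ []) :
    ∀ fuel (l acc : List Char), l.length ≤ fuel →
      PySem.Chars.replace.go old new fuel l acc = acc.reverse ++ rep old new l := by
  intro fuel
  induction fuel with
  | zero =>
    intro l acc hl
    have hl0 : l = [] := List.eq_nil_of_length_eq_zero (Nat.le_zero.mp hl)
    subst hl0
    rw [PySem.Chars.replace.go, rep]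
  | succ n ih =>
    intro l acc hl
    cases l with
    | nil =>
      rw [PySem.Chars.replace.go, rep]
      · simp
      · intro h; omega
    | cons c t =>
      rw [PySem.Chars.replace.go]
      by_cases hp : old.isPrefixOf (c :: t)
      · have h1 : 1 ≤ old.length := by
          cases old with
          | nil => exact absurd rfl hne
          | cons a l => simp
        simp only [hp, if_true]
        rw [ih ((c :: t).drop old.length) (new.reverse ++ acc)
              (by simp [List.length_drop] at hl ⊢; omega)]
        rw [rep, dif_pos ⟨hne, hp⟩]
        simp
      · simp only [hp]
        rw [ih t (c :: acc) (by simp at hl ⊢; omega)]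
        rw [rep, dif_neg (by rintro ⟨-, hp'⟩; exact hp hp')]
        simp

theorem rep_eq_replace (old new s : List Char) (hne : old ≠ []) :
    PySem.Chars.replace s old new = rep old new s := by
  have hE : old.isEmpty = false := by cases old with
    | nil => exact absurd rfl hne
    | cons a l => rfl
  rw [PySem.Chars.replace, hE]
  simpa using go_spec old new hne s.length s [] le_rfl

-- robust mismatch: a difference inside the overlap of a and b, so a can never match
-- at b's start whatever follows b
def misB (a b : List Char) : Bool :=
  (List.range (min a.length b.length)).any (fun i => a.getD i ' ' != b.getD i ' ')

theorem misB_not_prefix {a b : List Char} (h : misB a b = true) (u : List Char) :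
    ¬ a <+: (b ++ u) := by
  intro hpre
  simp only [misB, List.any_eq_true, List.mem_range] at h
  obtain ⟨i, hi, hne⟩ := h
  have ha : i < a.length := lt_of_lt_of_le hi (min_le_left _ _)
  have hb : i < b.length := lt_of_lt_of_le hi (min_le_right _ _)
  have hb' : i < (b ++ u).length := by simp; omega
  have h1 : a[i] = (b ++ u)[i] := hpre.getElem ha
  rw [List.getElem_append_left hb] at h1
  rw [List.getD_eq_getElem a ' ' ha, List.getD_eq_getElem b ' ' hb] at hne
  simp [h1] at hne

theorem skip_lemma (old new blk : List Char)
    (h : ∀ p < blk.length, misB old (blk.drop p) = true) :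
    ∀ u, rep old new (blk ++ u) = blk ++ rep old new u := by
  induction blk with
  | nil => simp
  | cons b blk ih =>
    intro u
    have h0 : misB old (b :: blk) = true := by simpa using h 0 (by simp)
    have hnp : ¬ old <+: ((b :: blk) ++ u) := misB_not_prefix h0 u
    rw [List.cons_append, rep, dif_neg
        (by rintro ⟨-, hp⟩; exact hnp (List.isPrefixOf_iff_prefix.mp hp))]
    rw [ih (fun p hp => by simpa using h (p + 1) (by simp; omega)) u]
    simp

theorem match_lemma (old new : List Char) (hne : old ≠ []) (u : List Char) :
    rep old new (old ++ u) = new ++ rep old new u := by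
  cases old with
  | nil => exact absurd rfl hne
  | cons a old' =>
    rw [List.cons_append, rep, dif_pos ⟨hne, List.isPrefixOf_iff_prefix.mpr
        (by rw [← List.cons_append]; exact List.prefix_append _ _)⟩]
    congr 1
    rw [← List.cons_append]
    rw [show ((a :: old') ++ u).drop (a :: old').length = u from List.drop_left]

theorem noCreate (old new pat : List Char)
    (htab : ∀ w ∈ pat.tails, w ≠ [] → misB w new = true) :
    ∀ u w, w <:+ pat → ¬ w <+: u → ¬ w <+: rep old new u := by
  suffices H : ∀ n (u : List Char), u.length ≤ n → ∀ w, w <:+ pat → ¬ w <+: u →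
      ¬ w <+: rep old new u by
    intro u w h1 h2; exact H u.length u le_rfl w h1 h2
  intro n
  induction n with
  | zero =>
    intro u hu w _ hwu
    have hu0 : u = [] := List.eq_nil_of_length_eq_zero (Nat.le_zero.mp hu)
    subst hu0; simpa [rep] using hwu
  | succ n ih =>
    intro u hu w hwpat hwu
    cases u with
    | nil => simpa [rep] using hwu
    | cons c v =>
      rw [rep]
      by_cases hcond : old ≠ [] ∧ old.isPrefixOf (c :: v)
      · rw [dif_pos hcond]
        have hwne : w ≠ [] := by rintro rfl; exact hwu (List.nil_prefix)
        exact misB_not_prefix (htab w ((List.mem_tails _ _).mpr hwpat) hwne) _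
      · rw [dif_neg hcond]
        rintro hcon
        cases w with
        | nil => exact hwu List.nil_prefix
        | cons a w' =>
          rw [List.cons_prefix_cons] at hcon
          obtain ⟨rfl, hw'⟩ := hcon
          have hnw' : ¬ w' <+: v := fun hp => hwu (List.cons_prefix_cons.mpr ⟨rfl, hp⟩)
          have hw'pat : w' <:+ pat := (List.suffix_cons a w').trans hwpat
          exact ih v (by simp at hu ⊢; omega) w' hw'pat hnw' hw'

def step (t : List Char) (p : List Char × List Char) : List Char := rep p.1 p.2 t

theorem foldl_skip (rs : List (List Char × List Char)) (blk : List Char)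
    (h : ∀ r ∈ rs, ∀ p < blk.length, misB r.1 (blk.drop p) = true) :
    ∀ u, List.foldl step (blk ++ u) rs = blk ++ List.foldl step u rs := by
  induction rs generalizing blk with
  | nil => intro u; simp
  | cons r rs ih =>
    intro u
    simp only [List.foldl_cons]
    rw [show step (blk ++ u) r = blk ++ step u r from
      skip_lemma r.1 r.2 blk (h r (List.mem_cons_self)) u]
    exact ih blk (fun r' hr' => h r' (List.mem_cons_of_mem _ hr')) (step u r)

theorem foldl_nomatch (rs : List (List Char × List Char))
    (htab : ∀ r ∈ rs, ∀ r' ∈ rs, ∀ w ∈ r.1.tails, w ≠ [] → misB w r'.2 = true) :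
    ∀ (c : Char) (t : List Char), (∀ r ∈ rs, ¬ r.1 <+: (c :: t)) →
      List.foldl step (c :: t) rs = c :: List.foldl step t rs := by
  induction rs with
  | nil => intro c t _; simp
  | cons r rs ih =>
    intro c t hno
    simp only [List.foldl_cons]
    have h1 : step (c :: t) r = c :: step t r := by
      show rep r.1 r.2 (c :: t) = c :: rep r.1 r.2 t
      rw [rep, dif_neg]
      rintro ⟨-, hp⟩
      exact hno r (List.mem_cons_self) (List.isPrefixOf_iff_prefix.mp hp)
    rw [h1]
    apply ih (fun a ha a' ha' => htab a (List.mem_cons_of_mem _ ha) a' (List.mem_cons_of_mem _ ha'))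
    intro r' hr'
    have h2 : c :: step t r = rep r.1 r.2 (c :: t) := h1.symm
    rw [h2]
    exact noCreate r.1 r.2 r'.1
      (htab r' (List.mem_cons_of_mem _ hr') r (List.mem_cons_self))
      (c :: t) r'.1 List.suffix_rfl (hno r' (List.mem_cons_of_mem _ hr'))

def Rfun (s : List Char) : List Char := altRoutes.foldl step s

-- the decidable facts about the literal table that the equivalence rests on
theorem tab_ne : ∀ r ∈ altRoutes, r.1 ≠ [] := by decide

theorem tab_nodup : altRoutes.Nodup := by decide

-- A's pair list, mapped to char lists, is exactly B's zipped route list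
theorem routes_map_eq : routeTable.map (fun p => (p.1.toList, p.2.toList)) = altRoutes := by decide

-- distinct patterns disagree inside their overlap at every offset (no cross match)
theorem tab_pat : ∀ r ∈ altRoutes, ∀ r' ∈ altRoutes, r ≠ r' →
    ∀ q < r'.1.length, misB r.1 (r'.1.drop q) = true := by decide

-- no pattern can start matching anywhere inside any replacement output
theorem tab_repl : ∀ r ∈ altRoutes, ∀ r' ∈ altRoutes,
    ∀ q < r'.2.length, misB r.1 (r'.2.drop q) = true := by decide

-- no nonempty pattern suffix agrees with a replacement's start (noCreate's table)
theorem tab_suff : ∀ r ∈ altRoutes, ∀ r' ∈ altRoutes,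
    ∀ w ∈ r.1.tails, w ≠ [] → misB w r'.2 = true := by decide

theorem foldl_step_nil : ∀ rs : List (List Char × List Char), List.foldl step [] rs = [] := by
  intro rs
  induction rs with
  | nil => rfl
  | cons r rs ih => simp only [List.foldl_cons]; rw [show step [] r = [] from by simp [step, rep]]; exact ih

theorem bGo_none (c : Char) (t : List Char)
    (h : altRoutes.find? (fun p => PySem.Chars.startswith (c :: t) p.1) = none) :
    bGo (c :: t) = c :: bGo t := by
  rw [bGo, h]

theorem bGo_some (c : Char) (t : List Char) (p : List Char × List Char)
    (h : altRoutes.find? (fun p => PySem.Chars.startswith (c :: t) p.1) = some p) :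
    bGo (c :: t) = p.2 ++ bGo ((c :: t).drop p.1.length) := by
  rw [bGo, h]

theorem main_lemma : ∀ s : List Char, Rfun s = bGo s := by
  suffices H : ∀ n (s : List Char), s.length ≤ n → Rfun s = bGo s by
    intro s; exact H s.length s le_rfl
  intro n
  induction n with
  | zero =>
    intro s hs
    have hs0 : s = [] := List.eq_nil_of_length_eq_zero (Nat.le_zero.mp hs)
    subst hs0
    rw [show bGo [] = [] from by rw [bGo]]
    exact foldl_step_nil altRoutes
  | succ n ih =>
    intro s hs
    cases s with
    | nil =>
      rw [show bGo [] = [] from by rw [bGo]]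
      exact foldl_step_nil altRoutes
    | cons c t =>
      cases h : altRoutes.find? (fun p => PySem.Chars.startswith (c :: t) p.1) with
      | none =>
        have hno : ∀ r ∈ altRoutes, ¬ r.1 <+: (c :: t) := by
          intro r hr hp
          have := List.find?_eq_none.mp h r hr
          simp [PySem.Chars.startswith_iff] at this
          exact this hp
        rw [bGo_none c t h, show Rfun (c :: t) = c :: Rfun t from
          foldl_nomatch altRoutes tab_suff c t hno]
        rw [ih t (by simp at hs; omega)]
      | some p =>
        have hmem : p ∈ altRoutes := List.mem_of_find?_eq_some h
        obtain ⟨hpred, as, bs, hl, _⟩ := List.find?_eq_some_iff_append.mp h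
        have hpre : p.1 <+: (c :: t) := (PySem.Chars.startswith_iff _ _).mp hpred
        obtain ⟨u, hu⟩ := hpre
        have hne1 : p.1 ≠ [] := tab_ne p hmem
        have h1 : 1 ≤ p.1.length := by
          cases hp1 : p.1 with
          | nil => exact absurd hp1 hne1
          | cons a l => simp
        -- memberships and distinctness from the split table
        have hndsplit := List.nodup_append.mp (hl ▸ tab_nodup)
        have hasmem : ∀ r ∈ as, r ∈ altRoutes := fun r hr => hl ▸ List.mem_append_left _ hr
        have hbsmem : ∀ r ∈ bs, r ∈ altRoutes := fun r hr =>
          hl ▸ List.mem_append_right _ (List.mem_cons_of_mem _ hr)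
        have hasne : ∀ r ∈ as, r ≠ p := fun r hr hrp =>
          hndsplit.2.2 r hr p (List.mem_cons_self) hrp
        have hbsne : ∀ r ∈ bs, r ≠ p := fun r hr hrp => by
          have := (List.nodup_cons.mp hndsplit.2.1).1
          exact this (hrp ▸ hr)
        -- the three passes
        have hskipas : ∀ v, List.foldl step (p.1 ++ v) as = p.1 ++ List.foldl step v as :=
          foldl_skip as p.1 (fun r hr => tab_pat r (hasmem r hr) p hmem (hasne r hr))
        have hskipbs : ∀ v, List.foldl step (p.2 ++ v) bs = p.2 ++ List.foldl step v bs :=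
          foldl_skip bs p.2 (fun r hr => tab_repl r (hbsmem r hr) p hmem)
        have hRfun : ∀ v : List Char, Rfun (p.1 ++ v) = p.2 ++ Rfun v := by
          intro v
          show List.foldl step (p.1 ++ v) altRoutes = p.2 ++ List.foldl step v altRoutes
          rw [hl, List.foldl_append, List.foldl_append, List.foldl_cons, List.foldl_cons]
          rw [hskipas v]
          rw [show step (p.1 ++ List.foldl step v as) p
              = p.2 ++ step (List.foldl step v as) p from
            match_lemma p.1 p.2 hne1 _]
          exact hskipbs _
        have hdrop : (c :: t).drop p.1.length = u := by rw [← hu, List.drop_left]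
        have hlen : p.1.length + u.length = t.length + 1 := by
          have h2 := congrArg List.length hu; simpa using h2
        have hulen : u.length ≤ n := by simp at hs; omega
        rw [bGo_some c t p h, hdrop, ← hu, hRfun u, ih u hulen]

theorem foldl_str (rs : List (String × String)) (hne : ∀ r ∈ rs, r.1.toList ≠ []) :
    ∀ text : String,
      (rs.foldl (fun t p => PySem.Str.replace t p.1 p.2) text).toList
        = List.foldl step text.toList (rs.map (fun p => (p.1.toList, p.2.toList))) := by
  induction rs with
  | nil => intro text; simp
  | cons r rs ih =>
    intro text
    simp only [List.foldl_cons, List.map_cons]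
    rw [ih (fun r' hr' => hne r' (List.mem_cons_of_mem _ hr'))]
    congr 1
    show (PySem.Str.replace text r.1 r.2).toList = rep r.1.toList r.2.toList text.toList
    rw [PySem.Str.toList_replace]
    exact rep_eq_replace _ _ _ (hne r (List.mem_cons_self))

-- ===== VERDICT (by name: the statement is the Claim_ definition above) =====
theorem apply_common_route_replacements_spec : Claim_equal_apply_common_route_replacements := by
  intro text _
  show apply_common_route_replacements text = apply_common_route_replacements_alt text
  rw [← String.toList_inj]
  rw [show (apply_common_route_replacements_alt text).toList = bGo text.toList from
    String.toList_ofList]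
  rw [show (apply_common_route_replacements text).toList = List.foldl step text.toList altRoutes from
    by unfold apply_common_route_replacements
       rw [foldl_str routeTable (by decide) text, routes_map_eq]]
  exact main_lemma text.toList
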